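-- pv_equiv track=rewrite | github.com/jimmyblaszkiewicz/CMPSC132 | HW2/HW2.py | findNextOpr
-- ===== SOURCE A (Python) =====
-- def findNextOpr(txt):
--     """
--         Takes a string and returns -1 if there is no operator in txt, otherwise returns
--         the position of the leftmost operator. +, -, *, / are all the 4 operators
--
--         >>> findNextOpr('  3*   4 - 5')
--         3
--         >>> findNextOpr('8   4 - 5')
--         6
--         >>> findNextOpr('89 4 5')
--         -1
--     """
--     if len(txt)<=0 or not isinstance(txt,str):
--         return "type error: findNextOpr"
--
--     # --- YOU CODE STARTS HERE
--
--     # list of operators and minimum index variable initialization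
--     operators = ['+', '-', '/', '*']
--
--     # set mindex to length of txt because no valid index will be greater than that
--     mindex = len(txt)
--
--     for i in range(len(operators)):
--         nextOper = txt.find(operators[i])
--
--         # if the operator is not in the text, continue. sending it to the elif
--         # would result in a -1 mindex which would be wrong
--         if nextOper == -1:
--             continue
--         elif nextOper < mindex:
--             mindex = nextOper
--
--     # if no operators found, ret -1, otherwise ret mindex
--     return -1 if mindex == len(txt) else mindex
-- ===== SOURCE B (Python) =====
-- def findNextOpr(txt):
--     if len(txt) <= 0 or not isinstance(txt, str):
--         return "type error: findNextOpr"
--     for i, ch in enumerate(txt):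
--         if ch in ('+', '-', '*', '/'):
--             return i
--     return -1
-- ===== Notes on version B (the rewrite author's own statement) =====
-- stated objective: idiomatic
-- what changed: Replaces the four independent str.find scans plus min-index tracking with a single left-to-right enumerate pass that returns the first operator index directly.
-- outside the precondition, e.g. on findNextOpr(''): A returns 'type error: findNextOpr', B returns 'type error: findNextOpr'
import Mathlib
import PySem

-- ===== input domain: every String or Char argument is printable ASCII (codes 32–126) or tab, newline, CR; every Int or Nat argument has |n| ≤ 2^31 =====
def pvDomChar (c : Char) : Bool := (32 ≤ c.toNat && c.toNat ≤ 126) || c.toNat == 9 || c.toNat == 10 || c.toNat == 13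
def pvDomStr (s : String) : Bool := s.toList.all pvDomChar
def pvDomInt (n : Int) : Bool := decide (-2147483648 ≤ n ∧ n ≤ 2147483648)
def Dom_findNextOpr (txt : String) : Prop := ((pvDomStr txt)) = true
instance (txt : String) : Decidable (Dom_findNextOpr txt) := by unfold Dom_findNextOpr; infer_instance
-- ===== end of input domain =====

-- B replaces A's four independent str.find scans + min-tracking by one left-to-right pass
-- returning the first operator index (idiomatic single scan; same cost class).

-- ===== PORT A =====
-- the loop body 'if nextOper == -1: continue; elif nextOper < mindex: mindex = nextOper'
def pvStep (mindex : Int) (nextOper : Int) : Int :=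
  if nextOper = -1 then mindex
  else if nextOper < mindex then nextOper else mindex

def findNextOpr (txt : String) : Int :=
  -- Python's guard returns the STRING "type error: findNextOpr" here (not an Int): outside Pre_; the port returns -1
  if PySem.Str.len txt ≤ 0 then -1
  else
    let operators : List String := ["+", "-", "/", "*"]
    let mindex : Int :=
      operators.foldl (fun mindex op => pvStep mindex (PySem.Str.find txt op)) (PySem.Str.len txt)
    if mindex = PySem.Str.len txt then -1 else mindex

-- ===== PORT B =====
-- 'for i, ch in enumerate(txt): if ch in ('+','-','*','/'): return i'
def pvScan : List Char → Int → Int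
  | [], _ => -1
  | ch :: rest, i =>
    if ch = '+' || ch = '-' || ch = '*' || ch = '/' then i else pvScan rest (i + 1)

def findNextOpr_alt (txt : String) : Int :=
  -- same guard as Source B; the type-error string branch is outside Pre_; the port returns -1
  if PySem.Str.len txt ≤ 0 then -1
  else pvScan txt.toList 0

-- ===== PRECONDITION & SPEC =====
-- Pre_ excludes only the empty string, on which A (and B) return the string "type error: findNextOpr", not an int.
def Pre_findNextOpr (txt : String) : Prop := txt ≠ ""
instance (txt : String) : Decidable (Pre_findNextOpr txt) := by unfold Pre_findNextOpr; infer_instance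
def pvWitness_findNextOpr : String := "  3*   4 - 5"

def Spec_findNextOpr (txt : String) (out : Int) : Prop := out = findNextOpr_alt txt
instance (txt : String) (out : Int) : Decidable (Spec_findNextOpr txt out) := by unfold Spec_findNextOpr; infer_instance

-- ===== CLAIM (what is proved, stated in full; the proofs are below) =====
def Claim_equal_findNextOpr : Prop := ∀ (txt : String), Dom_findNextOpr txt → Pre_findNextOpr txt → Spec_findNextOpr txt (findNextOpr txt)

-- ===== LEMMAS AND PROOFS =====

-- the operator predicate of B's scan
def pvOp (c : Char) : Bool := c = '+' || c = '-' || c = '*' || c = '/'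

theorem pvScan_eq (S : List Char) (i : Int) :
    pvScan S i = (S.findIdx? pvOp).elim (-1) (fun j => i + (j : Int)) := by
  induction S generalizing i with
  | nil => simp [pvScan]
  | cons c rest ih =>
    simp only [pvScan, List.findIdx?_cons]
    by_cases h : pvOp c
    · have h' : (c = '+' || c = '-' || c = '*' || c = '/') = true := h
      simp [h, h']
    · have h' : ¬((c = '+' || c = '-' || c = '*' || c = '/') = true) := h
      rw [if_neg h', if_neg h, ih]
      cases hf : rest.findIdx? pvOp <;> simp <;> omega

theorem pv_single_prefix_drop (c : Char) (S : List Char) (j : ℕ) :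
    [c] <+: S.drop j ↔ S[j]? = some c := by
  rw [← List.head?_drop]
  cases hd : S.drop j with
  | nil => simp
  | cons a r =>
    simp only [List.head?_cons]
    constructor
    · rintro ⟨t, ht⟩
      simp only [List.singleton_append] at ht
      rw [List.cons.injEq] at ht
      exact congrArg some ht.1.symm
    · intro h
      rw [Option.some.injEq] at h
      exact ⟨r, by simp [h]⟩

theorem pv_find_single (S : List Char) (c : Char) :
    PySem.Chars.find S [c] = (S.findIdx? (fun x => x = c)).elim (-1) (fun j => (j : Int)) := by
  cases hf : S.findIdx? (fun x => x = c) with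
  | none =>
    have hmem : c ∉ S := by
      rw [List.findIdx?_eq_none_iff] at hf
      intro hc; simpa using hf c hc
    have : ¬ [c] <:+: S := by rw [List.singleton_infix_iff]; exact hmem
    simp [Option.elim, (PySem.Chars.find_eq_neg_one_iff S [c]).mpr this]
  | some j =>
    rw [List.findIdx?_eq_some_iff_getElem] at hf
    obtain ⟨hj, hcj, hmin⟩ := hf
    simp only [decide_eq_true_eq] at hcj hmin
    have hmem : c ∈ S := hcj ▸ S.getElem_mem hj
    have hne : PySem.Chars.find S [c] ≠ -1 := by
      rw [ne_eq, PySem.Chars.find_eq_neg_one_iff, List.singleton_infix_iff]; simpa using hmem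
    have hnn : 0 ≤ PySem.Chars.find S [c] := by
      have := PySem.Chars.neg_one_le_find (s := S) (sub := [c]); omega
    obtain ⟨hpre, hminf⟩ := PySem.Chars.find_spec hnn
    set t := (PySem.Chars.find S [c]).toNat with ht
    rw [pv_single_prefix_drop] at hpre
    have htj : t = j := by
      rcases lt_trichotomy t j with h | h | h
      · exact absurd (by rw [(List.getElem?_eq_some_iff.mp hpre).choose_spec]) (hmin t h)
      · exact h
      · exact absurd ((pv_single_prefix_drop c S j).mpr (by simp [List.getElem?_eq_some_iff]; exact ⟨hj, hcj⟩)) (hminf j h)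
    simp only [Option.elim]
    omega

theorem pv_fold_all_neg (vals : List Int) (acc : Int)
    (h : ∀ v ∈ vals, v = -1) : List.foldl pvStep acc vals = acc := by
  induction vals generalizing acc with
  | nil => rfl
  | cons v vals ih =>
    have hv := h v (List.mem_cons_self ..)
    simp only [List.foldl_cons, pvStep, if_pos hv]
    exact ih acc (fun w hw => h w (List.mem_cons_of_mem _ hw))

theorem pv_fold_props (vals : List Int) (acc : Int) :
    (List.foldl pvStep acc vals = acc ∨
      (List.foldl pvStep acc vals ∈ vals ∧ List.foldl pvStep acc vals ≠ -1)) ∧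
    List.foldl pvStep acc vals ≤ acc ∧
    (∀ v ∈ vals, v ≠ -1 → List.foldl pvStep acc vals ≤ v) := by
  induction vals generalizing acc with
  | nil => simp
  | cons v vals ih =>
    simp only [List.foldl_cons]
    obtain ⟨ih1, ih2, ih3⟩ := ih (pvStep acc v)
    have hstep : pvStep acc v = acc ∨ (pvStep acc v = v ∧ v ≠ -1) := by
      unfold pvStep; split_ifs <;> simp_all
    have hle : pvStep acc v ≤ acc ∧ (v ≠ -1 → pvStep acc v ≤ v) := by
      unfold pvStep; split_ifs <;> constructor <;> intros <;> omega
    refine ⟨?_, by omega, ?_⟩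
    · rcases ih1 with h | ⟨h1, h2⟩
      · rcases hstep with h' | ⟨h', hv⟩
        · left; omega
        · right; rw [h] at *; exact ⟨by simp [h'], by omega⟩
      · right; exact ⟨List.mem_cons_of_mem _ h1, h2⟩
    · intro w hw hwne
      rcases List.mem_cons.mp hw with rfl | hw
      · exact le_trans ih2 (hle.2 hwne)
      · exact ih3 w hw hwne

-- abbreviation used only in the proofs
theorem pv_main (S : List Char) :
    (if List.foldl pvStep ((S.length : Int))
        (["+", "-", "/", "*"].map (fun c => PySem.Chars.find S c.toList)) = (S.length : Int)
     then (-1 : Int)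
     else List.foldl pvStep ((S.length : Int))
        (["+", "-", "/", "*"].map (fun c => PySem.Chars.find S c.toList)))
    = (S.findIdx? pvOp).elim (-1) (fun j => (j : Int)) := by
  have hlist : (["+", "-", "/", "*"].map (fun c : String => PySem.Chars.find S c.toList))
      = [PySem.Chars.find S ['+'], PySem.Chars.find S ['-'],
         PySem.Chars.find S ['/'], PySem.Chars.find S ['*']] := by rfl
  rw [hlist]
  cases hB : S.findIdx? pvOp with
  | none =>
    have hnone : ∀ c : Char, pvOp c → S.findIdx? (fun x => x = c) = none := by
      intro c hc
      rw [List.findIdx?_eq_none_iff] at hB ⊢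
      intro x hx
      by_cases hxc : x = c
      · exact absurd (hxc ▸ hc) (by simpa using hB x hx)
      · simpa using hxc
    have hall : ∀ v ∈ [PySem.Chars.find S ['+'], PySem.Chars.find S ['-'],
         PySem.Chars.find S ['/'], PySem.Chars.find S ['*']], v = -1 := by
      intro v hv
      simp only [List.mem_cons, List.not_mem_nil, or_false] at hv
      rcases hv with rfl | rfl | rfl | rfl <;>
        rw [pv_find_single] <;>
        [rw [hnone '+' (by decide)]; rw [hnone '-' (by decide)];
         rw [hnone '/' (by decide)]; rw [hnone '*' (by decide)]] <;> rfl
    rw [pv_fold_all_neg _ _ hall]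
    simp
  | some j =>
    rw [List.findIdx?_eq_some_iff_getElem] at hB
    obtain ⟨hj, hopj, hminj⟩ := hB
    -- every non-(-1) entry is the first index of its operator char, hence ≥ j (and < length)
    have hbound : ∀ v ∈ [PySem.Chars.find S ['+'], PySem.Chars.find S ['-'],
         PySem.Chars.find S ['/'], PySem.Chars.find S ['*']],
         v = -1 ∨ ((j : Int) ≤ v ∧ v < (S.length : Int)) := by
      have key : ∀ c : Char, pvOp c →
          PySem.Chars.find S [c] = -1 ∨
          ((j : Int) ≤ PySem.Chars.find S [c] ∧ PySem.Chars.find S [c] < (S.length : Int)) := by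
        intro c hc
        rw [pv_find_single]
        cases hf : S.findIdx? (fun x => x = c) with
        | none => left; rfl
        | some k =>
          right
          rw [List.findIdx?_eq_some_iff_getElem] at hf
          obtain ⟨hk, hck, _⟩ := hf
          simp only [decide_eq_true_eq] at hck
          have : ¬ k < j := fun h => hminj k h (by rw [hck]; exact hc)
          simp only [Option.elim]
          omega
      intro v hv
      simp only [List.mem_cons, List.not_mem_nil, or_false] at hv
      rcases hv with rfl | rfl | rfl | rfl <;>
        [exact key '+' (by decide); exact key '-' (by decide);
         exact key '/' (by decide); exact key '*' (by decide)]
    -- j itself is attained: the operator at j has first occurrence exactly j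
    have hattain : (j : Int) ∈ [PySem.Chars.find S ['+'], PySem.Chars.find S ['-'],
         PySem.Chars.find S ['/'], PySem.Chars.find S ['*']] := by
      have hfirst : S.findIdx? (fun x => x = S[j]) = some j := by
        rw [List.findIdx?_eq_some_iff_getElem]
        refine ⟨hj, by simp, fun k hk => ?_⟩
        simp only [decide_eq_true_eq]
        intro hkj
        exact hminj k hk (by rw [hkj]; exact hopj)
      have hfind : PySem.Chars.find S [S[j]] = (j : Int) := by
        rw [pv_find_single, hfirst]; rfl
      have hop : pvOp S[j] = true := hopj
      simp only [pvOp, Bool.or_eq_true, decide_eq_true_eq] at hop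
      rcases hop with ((h | h) | h) | h <;> rw [← hfind, h] <;> simp
    obtain ⟨hform, _, hub⟩ := pv_fold_props
      [PySem.Chars.find S ['+'], PySem.Chars.find S ['-'],
       PySem.Chars.find S ['/'], PySem.Chars.find S ['*']] ((S.length : Int))
    have hlej : List.foldl pvStep ((S.length : Int)) _ ≤ (j : Int) :=
      hub _ hattain (by omega)
    have hjlt : (j : Int) < (S.length : Int) := by exact_mod_cast hj
    have heq : List.foldl pvStep ((S.length : Int))
        [PySem.Chars.find S ['+'], PySem.Chars.find S ['-'],
         PySem.Chars.find S ['/'], PySem.Chars.find S ['*']] = (j : Int) := by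
      rcases hform with h | ⟨hmem, hne⟩
      · omega
      · have := hbound _ hmem
        omega
    rw [heq, if_neg (by omega)]
    rfl

-- ===== VERDICT (by name: the statement is the Claim_ definition above) =====
theorem findNextOpr_spec : Claim_equal_findNextOpr := by
  intro txt _ hpre
  unfold Spec_findNextOpr findNextOpr findNextOpr_alt
  have hnil : txt.toList ≠ [] := by
    intro h
    exact hpre (by rwa [String.toList_eq_nil_iff] at h)
  have hlen' : PySem.Str.len txt = (txt.toList.length : Int) := by
    simp only [PySem.Str.len_eq, String.length_toList]
  have hlen : ¬ PySem.Str.len txt ≤ 0 := by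
    rw [hlen']
    have : 0 < txt.toList.length := List.length_pos_iff.mpr hnil
    omega
  rw [if_neg hlen, if_neg hlen, pvScan_eq]
  simp only [PySem.Str.find_eq, hlen']
  rw [show (List.foldl (fun mindex op => pvStep mindex (PySem.Chars.find txt.toList op.toList))
        ((txt.toList.length : Int)) ["+", "-", "/", "*"])
      = List.foldl pvStep ((txt.toList.length : Int))
        (["+", "-", "/", "*"].map (fun c => PySem.Chars.find txt.toList c.toList)) from
      by rw [List.foldl_map]]
  rw [pv_main txt.toList]
  cases hf : txt.toList.findIdx? pvOp <;> simp [Option.elim]
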